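-- pv_equiv track=rewrite | github.com/baradl/eisenrecorder | utils/check.py | check_int_list
-- ===== SOURCE A (Python) =====
-- def check_int_list(int_list):
--     int_list.sort()
--     n = len(int_list)
--     missing = []
--     multi   = []
--     for i in range(1,n):
--         if int_list[i] == int_list[i-1]:
--             multi.append(int_list[i])
--         if int_list[i] != int_list[i-1] + 1:
--             for j in range(int_list[i-1] + 1, int_list[i]):
--                 missing.append(j)
--     return [multi, missing]
-- ===== SOURCE B (Python) =====
-- def check_int_list(int_list):
--     int_list.sort()
--     if not int_list:
--         return [[], []]
--     cnt = {}
--     for v in int_list: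
--         cnt[v] = cnt.get(v, 0) + 1
--     present = set(int_list)
--     missing = [x for x in range(int_list[0], int_list[-1] + 1) if x not in present]
--     multi = [v for v in sorted(present) for _ in range(cnt[v] - 1)]
--     return [multi, missing]
-- ===== Notes on version B (the rewrite author's own statement) =====
-- stated objective: alternative
-- what changed: Replaces A's single neighbour-difference scan over adjacent sorted elements by value-level machinery: a one-pass dict of occurrence counts rebuilds the duplicates (count-1 copies per sorted distinct value) and a set-membership filter over range(min, max+1) yields the gaps.
import Mathlib
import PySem

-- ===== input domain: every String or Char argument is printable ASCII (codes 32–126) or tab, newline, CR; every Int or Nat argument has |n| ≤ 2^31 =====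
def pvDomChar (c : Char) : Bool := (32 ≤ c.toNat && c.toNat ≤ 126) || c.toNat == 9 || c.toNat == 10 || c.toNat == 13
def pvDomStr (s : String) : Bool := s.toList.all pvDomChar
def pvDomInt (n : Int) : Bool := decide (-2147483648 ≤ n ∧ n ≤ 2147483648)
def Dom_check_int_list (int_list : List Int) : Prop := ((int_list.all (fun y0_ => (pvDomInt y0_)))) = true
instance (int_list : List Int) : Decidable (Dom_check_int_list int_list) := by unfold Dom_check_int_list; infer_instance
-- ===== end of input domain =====

-- B replaces A's neighbour-difference scan over adjacent sorted elements by value-level machinery: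
-- a membership set filters the full range [min, max] to get the gaps, and the duplicates are rebuilt
-- from per-value occurrence counts over the sorted distinct values. Same return value; in Python both
-- A and B sort the argument in place (the equivalence proved here is about the return value).


-- ===== PORT A =====
-- loop body of A's `for i in range(1, n)`; there `int_list[i]` and `int_list[i-1]` are always
-- in range, so pyGetD's default 0 is never used (A raises on no input)
def pvAStep (s : List Int) (acc : List Int × List Int) (i : Int) : List Int × List Int :=
  let xi := PySem.List.pyGetD s i 0
  let xp := PySem.List.pyGetD s (i - 1) 0
  (if xi = xp then acc.1 ++ [xi] else acc.1,
   if xi ≠ xp + 1 then acc.2 ++ PySem.List.pyRange (xp + 1) xi else acc.2)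

def check_int_list (int_list : List Int) : List (List Int) :=
  let s := PySem.List.sorted int_list id
  let r := (PySem.List.pyRange 1 (s.length : Int)).foldl (pvAStep s) ([], [])
  [r.1, r.2]

-- ===== PORT B =====
def check_int_list_alt (int_list : List Int) : List (List Int) :=
  let s := PySem.List.sorted int_list id
  if s.isEmpty then [[], []]
  else
    let cnt := s.foldl (fun (d : PySem.Dict Int Int) v => d.insert v (d.getD v 0 + 1)) PySem.Dict.empty
    let present := PySem.Set.ofList s
    let missing := (PySem.List.pyRange (PySem.List.pyGetD s 0 0) (PySem.List.pyGetD s (-1) 0 + 1)).filter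
        (fun x => !(present.contains x))
    let multi := (PySem.List.sorted present id).flatMap
        (fun v => List.replicate ((cnt.getD v 0 - 1).toNat) v)
    [multi, missing]

-- ===== PRECONDITION & SPEC =====
def Spec_check_int_list (int_list : List Int) (out : List (List Int)) : Prop := out = check_int_list_alt int_list
instance (int_list : List Int) (out : List (List Int)) : Decidable (Spec_check_int_list int_list out) := by unfold Spec_check_int_list; infer_instance

-- ===== CLAIM (what is proved, stated in full; the proofs are below) =====
def Claim_equal_check_int_list : Prop := ∀ (int_list : List Int), Dom_check_int_list int_list → Spec_check_int_list int_list (check_int_list int_list)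

-- ===== LEMMAS AND PROOFS =====

def pvAStep_pure (acc : List Int × List Int) (x y : Int) : List Int × List Int :=
  (if y = x then acc.1 ++ [y] else acc.1,
   if y ≠ x + 1 then acc.2 ++ PySem.List.pyRange (x + 1) y else acc.2)

def pvPair (acc : List Int × List Int) : Int → List Int → List Int × List Int
  | x, y :: t => pvPair (pvAStep_pure acc x y) y t
  | _, [] => acc

lemma pvGetD_app (p : List Int) (x : Int) (t : List Int) (k : Nat) :
    PySem.List.pyGetD (p ++ x :: t) ((p.length : Int) + k) 0 = (x :: t).getD k 0 := by
  have : ((p.length : Int) + k) = ((p.length + k : Nat) : Int) := by push_cast; ring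
  rw [this, PySem.List.pyGetD_natCast]
  simp [List.getD, List.getElem?_append_right]

lemma pvFoldIdx (t : List Int) : ∀ (p : List Int) (x : Int) (acc : List Int × List Int),
    (PySem.List.pyRange ((p.length : Int) + 1) ((p.length : Int) + 1 + t.length)).foldl
      (pvAStep (p ++ x :: t)) acc = pvPair acc x t := by
  induction t with
  | nil => intro p x acc; simp [PySem.List.pyRange, pvPair]
  | cons y t ih =>
    intro p x acc
    rw [PySem.List.pyRange_one_cons (by simp only [List.length_cons]; push_cast; omega)]
    rw [List.foldl_cons]
    have h1 : pvAStep (p ++ x :: y :: t) acc ((p.length : Int) + 1) = pvAStep_pure acc x y := by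
      unfold pvAStep pvAStep_pure
      have e1 := pvGetD_app p x (y :: t) 0
      have e2 := pvGetD_app p x (y :: t) 1
      simp only [Nat.cast_zero, Nat.cast_one, add_zero] at e1 e2
      rw [show (p.length : Int) + 1 - 1 = (p.length : Int) + 0 by ring] at *
      simp only [add_zero] at *
      rw [e2, e1]
      simp [List.getD]
    rw [h1]
    have h2 := ih (p ++ [x]) y (pvAStep_pure acc x y)
    simp only [List.length_append, List.length_cons, List.length_nil] at h2 ⊢
    push_cast at h2 ⊢
    rw [show (p.length : Int) + 1 + (t.length + 1) = (p.length : Int) + 1 + 1 + t.length by ring]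
    rw [show (p ++ [x]) ++ y :: t = p ++ x :: y :: t by simp] at h2
    rw [h2]
    rfl

def pvDups : Int → List Int → List Int
  | x, y :: t => (if y = x then [y] else []) ++ pvDups y t
  | _, [] => []

def pvGaps : Int → List Int → List Int
  | x, y :: t => PySem.List.pyRange (x + 1) y ++ pvGaps y t
  | _, [] => []

lemma pvPair_acc (t : List Int) : ∀ (x : Int) (acc : List Int × List Int),
    pvPair acc x t = (acc.1 ++ pvDups x t, acc.2 ++ pvGaps x t) := by
  induction t with
  | nil => intro x acc; simp [pvPair, pvDups, pvGaps]
  | cons y t ih =>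
    intro x acc
    rw [pvPair, ih, pvDups, pvGaps]
    unfold pvAStep_pure
    by_cases h1 : y = x <;> by_cases h2 : y = x + 1 <;>
      simp [h1, h2, PySem.List.pyRange]

lemma pvHeadLeLast (t : List Int) : ∀ (x : Int), List.Pairwise (· ≤ ·) (x :: t) →
    x ≤ (x :: t).getLast (by simp) := by
  induction t with
  | nil => intro x _; simp
  | cons y t ih =>
    intro x h
    have h1 : x ≤ y := (List.pairwise_cons.mp h).1 y (by simp)
    have := ih y (List.pairwise_cons.mp h).2
    rw [List.getLast_cons (by simp)]
    omega

lemma pvLastNeg (x : Int) (t : List Int) :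
    PySem.List.pyGetD (x :: t) (-1) 0 = (x :: t).getLast (by simp) := by
  simp only [PySem.List.pyGetD, PySem.List.pyGet?, PySem.List.pyIdx?]
  norm_num
  rw [List.getLast_eq_getElem]
  congr 1

lemma pvRange_self (a : Int) : PySem.List.pyRange a a = [] := by
  simp [PySem.List.pyRange]

lemma pvGaps_eq (t : List Int) : ∀ (x : Int), List.Pairwise (· ≤ ·) (x :: t) →
    pvGaps x t = (PySem.List.pyRange x ((x :: t).getLast (by simp) + 1)).filter
      (fun z => !decide (z ∈ x :: t)) := by
  induction t with
  | nil =>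
    intro x _
    rw [pvGaps, List.getLast_singleton,
        PySem.List.pyRange_one_cons (by omega), pvRange_self]
    simp
  | cons y t ih =>
    intro x h
    obtain ⟨hx, hrest⟩ := List.pairwise_cons.mp h
    have hxy : x ≤ y := hx y (by simp)
    have hyl : y ≤ (y :: t).getLast (by simp) := pvHeadLeLast t y hrest
    have hyt : ∀ w ∈ t, y ≤ w := fun w hw => (List.pairwise_cons.mp hrest).1 w hw
    rw [pvGaps, List.getLast_cons (by simp)]
    rw [PySem.List.pyRange_one_append x y ((y :: t).getLast (by simp) + 1) hxy (by omega)]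
    rw [List.filter_append]
    congr 1
    · rcases lt_or_eq_of_le hxy with hlt | heq
      · rw [PySem.List.pyRange_one_cons hlt, List.filter_cons_of_neg (by simp)]
        symm
        apply List.filter_eq_self.mpr
        intro z hz
        have hb := PySem.List.mem_pyRange_one.mp hz
        simp only [List.mem_cons, Bool.not_eq_eq_eq_not, Bool.not_true, decide_eq_false_iff_not]
        push Not
        refine ⟨by omega, by omega, fun hz' => by have := hyt z hz'; omega⟩
      · rw [← heq, pvRange_self]; simp
    · rw [ih y hrest]
      apply List.filter_congr
      intro z hz
      have hb := PySem.List.mem_pyRange_one.mp hz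
      have hiff : (z ∈ x :: y :: t) ↔ (z ∈ y :: t) := by
        simp only [List.mem_cons]
        constructor
        · rintro (rfl | hz') 
          · left; omega
          · exact hz'
        · tauto
      rw [decide_eq_decide.mpr hiff]

lemma pvAdd_cons (acc : List Int) (x z : Int) (hzx : z ≠ x) :
    PySem.Set.add (x :: acc) z = x :: PySem.Set.add acc z := by
  simp [PySem.Set.add, hzx]
  split_ifs <;> simp_all

lemma pvFold_add_cons (l : List Int) : ∀ (acc : List Int) (x : Int), x ∉ l →
    List.foldl PySem.Set.add (x :: acc) l = x :: List.foldl PySem.Set.add acc l := by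
  induction l with
  | nil => intro acc x _; rfl
  | cons z l ih =>
    intro acc x hx
    simp only [List.foldl_cons]
    rw [pvAdd_cons acc x z (by simp at hx; tauto)]
    exact ih _ x (by simp at hx; tauto)

lemma pvFold_add_append (l : List Int) : ∀ (acc : List Int),
    ∃ r, List.foldl PySem.Set.add acc l = acc ++ r := by
  induction l with
  | nil => intro acc; exact ⟨[], by simp⟩
  | cons z l ih =>
    intro acc
    simp only [List.foldl_cons, PySem.Set.add]
    split_ifs with h
    · exact ih acc
    · obtain ⟨r, hr⟩ := ih (acc ++ [z])
      exact ⟨[z] ++ r, by simp [hr]⟩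

lemma pvOfList_sublist (s : List Int) : (PySem.Set.ofList s).Sublist s := by
  induction s using List.reverseRecOn with
  | nil => simp [PySem.Set.ofList]
  | append_singleton l x ih =>
    have : PySem.Set.ofList (l ++ [x]) = PySem.Set.add (PySem.Set.ofList l) x := by
      simp [PySem.Set.ofList]
    rw [this, PySem.Set.add]
    split_ifs with h
    · exact ih.trans (List.sublist_append_left l [x])
    · exact List.Sublist.append ih (List.Sublist.refl [x])

lemma pvSorted_ofList (s : List Int) (h : List.Pairwise (· ≤ ·) s) :
    PySem.List.sorted (PySem.Set.ofList s) id = PySem.Set.ofList s := by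
  apply PySem.List.sorted_eq_of_perm_of_pairwise_lt _ _ id (List.Perm.refl _)
  have h1 : List.Pairwise (· ≤ ·) (PySem.Set.ofList s) := List.Pairwise.sublist (pvOfList_sublist s) h
  have h2 : List.Pairwise (· ≠ ·) (PySem.Set.ofList s) := PySem.Set.nodup_ofList s
  exact (h1.and h2).imp (fun hab => lt_of_le_of_ne hab.1 hab.2)

lemma pvFlatMap_congr {α β : Type} (l : List α) (f g : α → List β)
    (h : ∀ v ∈ l, f v = g v) : l.flatMap f = l.flatMap g := by
  induction l with
  | nil => rfl
  | cons a l ih =>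
    simp only [List.flatMap_cons]
    rw [h a (by simp), ih (fun v hv => h v (by simp [hv]))]

lemma pvDups_eq (t : List Int) : ∀ (x : Int), List.Pairwise (· ≤ ·) (x :: t) →
    pvDups x t = (PySem.Set.ofList (x :: t)).flatMap
      (fun v => List.replicate (List.count v (x :: t) - 1) v) := by
  induction t with
  | nil =>
    intro x _
    simp [pvDups, PySem.Set.ofList, PySem.Set.add]
  | cons y t ih =>
    intro x h
    obtain ⟨hx, hrest⟩ := List.pairwise_cons.mp h
    by_cases hyx : y = x
    · subst hyx
      have hof2 : PySem.Set.ofList (y :: y :: t) = PySem.Set.ofList (y :: t) := by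
        simp [PySem.Set.ofList, PySem.Set.add]
      obtain ⟨r, hr⟩ := pvFold_add_append t [y]
      have hof1 : PySem.Set.ofList (y :: t) = [y] ++ r := by
        simpa [PySem.Set.ofList, PySem.Set.add] using hr
      have hnd := PySem.Set.nodup_ofList (y :: t)
      rw [hof1] at hnd
      have hyr : y ∉ r := by simp at hnd; exact hnd.1
      have ihy := ih y hrest
      rw [hof1] at ihy
      rw [pvDups, if_pos rfl, hof2, hof1, ihy]
      simp only [List.singleton_append, List.flatMap_cons]
      have hc : List.count y (y :: y :: t) - 1 = List.count y (y :: t) := by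
        simp [List.count_cons_self]
      rw [hc]
      have hM : List.flatMap (fun v => List.replicate (List.count v (y :: y :: t) - 1) v) r
          = List.flatMap (fun v => List.replicate (List.count v (y :: t) - 1) v) r := by
        apply pvFlatMap_congr
        intro v hv
        have hvy : v ≠ y := fun hc' => hyr (hc' ▸ hv)
        simp [Ne.symm hvy]
      rw [hM]
      have hcpos : 1 ≤ List.count y (y :: t) := by simp [List.count_cons_self]
      rw [show List.count y (y :: t) = (List.count y (y :: t) - 1) + 1 by omega,
          List.replicate_succ]
      simp
    · have hxy : x < y := lt_of_le_of_ne (hx y (by simp)) (Ne.symm hyx)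
      have hxmem : x ∉ y :: t := by
        intro hm
        rcases List.mem_cons.mp hm with rfl | hm'
        · omega
        · have := (List.pairwise_cons.mp hrest).1 x hm'
          omega
      have hof : PySem.Set.ofList (x :: y :: t) = x :: PySem.Set.ofList (y :: t) := by
        have h1 : PySem.Set.ofList (x :: y :: t) = List.foldl PySem.Set.add [x] (y :: t) := by
          simp [PySem.Set.ofList, PySem.Set.add]
        rw [h1, pvFold_add_cons _ [] x hxmem]
        rfl
      rw [pvDups, if_neg hyx, hof, List.flatMap_cons]
      have hcx : List.count x (x :: y :: t) = 1 := by
        simp [List.count_cons_self, List.count_eq_zero.mpr hxmem]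
      rw [hcx]
      simp only [Nat.sub_self, List.replicate_zero, List.nil_append]
      rw [ih y hrest]
      apply pvFlatMap_congr
      intro v hv
      have hvm : v ∈ y :: t := (PySem.Set.mem_ofList _ _).mp hv
      have hvx : v ≠ x := fun hc' => hxmem (hc' ▸ hvm)
      simp [Ne.symm hvx]

lemma pvContains_ofList (l : List Int) (z : Int) :
    (PySem.Set.ofList l).contains z = decide (z ∈ l) := by
  by_cases hz : z ∈ l <;>
    simp [PySem.Set.mem_ofList, hz]

lemma pvHead0 (x : Int) (t : List Int) : PySem.List.pyGetD (x :: t) 0 0 = x := by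
  simp [PySem.List.pyGetD, PySem.List.pyGet?, PySem.List.pyIdx?]

lemma pvBody (s : List Int) (hp : List.Pairwise (· ≤ ·) s) :
    [((PySem.List.pyRange 1 (s.length : Int)).foldl (pvAStep s) ([], [])).1,
     ((PySem.List.pyRange 1 (s.length : Int)).foldl (pvAStep s) ([], [])).2] =
    (if s.isEmpty then [([] : List Int), []] else
      [(PySem.List.sorted (PySem.Set.ofList s) id).flatMap
          (fun v => List.replicate (((s.foldl (fun (d : PySem.Dict Int Int) v => d.insert v (d.getD v 0 + 1)) PySem.Dict.empty).getD v 0 - 1).toNat) v),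
       (PySem.List.pyRange (PySem.List.pyGetD s 0 0) (PySem.List.pyGetD s (-1) 0 + 1)).filter
          (fun z => !((PySem.Set.ofList s).contains z))]) := by
  cases s with
  | nil => simp [PySem.List.pyRange]
  | cons x t =>
    have hfold : (PySem.List.pyRange 1 ((x :: t).length : Int)).foldl (pvAStep (x :: t)) ([], [])
        = pvPair ([], []) x t := by
      have h := pvFoldIdx t [] x ([], [])
      simp only [List.length_nil, Nat.cast_zero, zero_add, List.nil_append, List.length_cons] at h ⊢
      push_cast at h ⊢
      convert h using 3
      ring
    rw [hfold, pvPair_acc]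
    simp only [List.nil_append, List.isEmpty_cons, Bool.false_eq_true, if_false]
    congr 1
    · rw [pvSorted_ofList _ hp]
      have hcnt : ((x :: t).foldl (fun (d : PySem.Dict Int Int) v => d.insert v (d.getD v 0 + 1)) PySem.Dict.empty)
          = PySem.Dict.counter (x :: t) := rfl
      rw [hcnt]
      have hrepl : (fun v => List.replicate (((PySem.Dict.counter (x :: t)).getD v 0 - 1).toNat) v)
          = fun v => List.replicate (List.count v (x :: t) - 1) v := by
        funext v
        rw [PySem.Dict.getD_counter]
        congr 1
        omega
      rw [hrepl]
      exact pvDups_eq t x hp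
    · congr 1
      rw [pvGaps_eq t x hp, pvHead0, pvLastNeg]
      apply List.filter_congr
      intro z _
      rw [pvContains_ofList]


-- ===== VERDICT (by name: the statement is the Claim_ definition above) =====
theorem check_int_list_spec : Claim_equal_check_int_list := by
  intro l _
  unfold Spec_check_int_list check_int_list check_int_list_alt
  have hp : List.Pairwise (· ≤ ·) (PySem.List.sorted l id) := by
    simpa using PySem.List.sorted_pairwise l id
  exact pvBody _ hp
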